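-- pv_equiv track=rewrite | github.com/daniel-reich/turbo-robot | MhtcQNMbkP82ZKJpm_24.py | get_notes_distribution
-- ===== SOURCE A (Python) =====
-- def get_notes_distribution(s):
--         vn=[1,2,3,4,5]
--         n={5:0,4:0,3:0,2:0,1:0}
--         for i in range(0,len(s)):
--                 for j in s[i]['notes']:
--                         if j in vn:
--                                 n[j]=n[j]+1
--         for k in range(1,6):
--                 if n[k]==0:
--                         del n[k]
--         return n
-- ===== SOURCE B (Python) =====
-- def get_notes_distribution(s):
--     result = {}
--     for v in (5, 4, 3, 2, 1):
--         c = sum(rec['notes'].count(v) for rec in s)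
--         if c != 0:
--             result[v] = c
--     return result
-- ===== Notes on version B (the rewrite author's own statement) =====
-- stated objective: alternative
-- what changed: Instead of one forward pass accumulating into a pre-seeded 1..5 dict followed by a zero-deletion pass, B loops over the fixed values 5..1, totals each value's occurrences with list.count across all records, and only inserts nonzero totals.
import Mathlib
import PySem

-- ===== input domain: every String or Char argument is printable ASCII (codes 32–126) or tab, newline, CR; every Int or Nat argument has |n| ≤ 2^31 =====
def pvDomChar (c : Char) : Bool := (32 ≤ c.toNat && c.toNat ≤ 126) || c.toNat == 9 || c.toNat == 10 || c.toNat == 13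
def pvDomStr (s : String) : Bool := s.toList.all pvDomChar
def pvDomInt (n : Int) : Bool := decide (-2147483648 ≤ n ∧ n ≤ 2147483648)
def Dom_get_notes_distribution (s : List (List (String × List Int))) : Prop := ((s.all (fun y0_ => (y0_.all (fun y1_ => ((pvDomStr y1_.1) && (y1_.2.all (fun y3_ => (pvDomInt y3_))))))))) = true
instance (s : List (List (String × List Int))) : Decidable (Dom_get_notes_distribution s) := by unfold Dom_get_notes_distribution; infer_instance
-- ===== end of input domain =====

-- B replaces A's single accumulating pass over all records (into a pre-seeded 1..5 dict,
-- followed by a zero-deletion pass) with one counting scan per target value 5..1,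
-- inserting only nonzero totals; same cost class, different decomposition.

-- ===== PORT A =====
def get_notes_distribution (s : List (List (String × List Int))) : List (Int × Int) :=
  let vn : List Int := [1, 2, 3, 4, 5]
  let n0 : PySem.Dict Int Int := PySem.Dict.mk [(5, 0), (4, 0), (3, 0), (2, 0), (1, 0)]
  -- for i in range(0, len(s)): for j in s[i]['notes']: if j in vn: n[j] = n[j] + 1
  -- (missing 'notes' key raises KeyError in Python: excluded by Pre_; the getD defaults are unreachable under Pre_)
  let n1 := (PySem.List.pyRange 0 (PySem.List.len s)).foldl (fun n i =>
      ((PySem.Dict.mk (PySem.List.pyGetD s i [])).getD "notes" []).foldl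
        (fun n j => if j ∈ vn then n.insert j (n.getD j 0 + 1) else n) n) n0
  -- for k in range(1, 6): if n[k] == 0: del n[k]   (each key 1..5 is still present when tested)
  let n2 := (PySem.List.pyRange 1 6).foldl (fun n k => if n.getD k 0 == 0 then n.erase k else n) n1
  n2.items

-- ===== PORT B =====
def get_notes_distribution_alt (s : List (List (String × List Int))) : List (Int × Int) :=
  (([5, 4, 3, 2, 1] : List Int).foldl (fun (r : PySem.Dict Int Int) v =>
      let c : Int := s.foldl (fun t rec =>
        t + (PySem.List.count ((PySem.Dict.mk rec).getD "notes" []) v : Int)) 0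
      if c ≠ 0 then r.insert v c else r) PySem.Dict.empty).items

-- ===== PRECONDITION & SPEC =====
-- Pre_ excludes records without a 'notes' key: there both the Python A and the Python B raise KeyError.
def Pre_get_notes_distribution (s : List (List (String × List Int))) : Prop :=
  ∀ rec ∈ s, (PySem.Dict.mk rec).contains "notes" = true
instance (s : List (List (String × List Int))) : Decidable (Pre_get_notes_distribution s) := by unfold Pre_get_notes_distribution; infer_instance

def pvWitness_get_notes_distribution : (List (List (String × List Int))) :=
  [[("notes", [1, 2, 2])], [("notes", [5, 0, 2])]]

def Spec_get_notes_distribution (s : List (List (String × List Int))) (out : List (Int × Int)) : Prop := out = get_notes_distribution_alt s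
instance (s : List (List (String × List Int))) (out : List (Int × Int)) : Decidable (Spec_get_notes_distribution s out) := by unfold Spec_get_notes_distribution; infer_instance

-- ===== CLAIM (what is proved, stated in full; the proofs are below) =====
def Claim_equal_get_notes_distribution : Prop := ∀ (s : List (List (String × List Int))), Dom_get_notes_distribution s → Pre_get_notes_distribution s → Spec_get_notes_distribution s (get_notes_distribution s)

-- ===== LEMMAS AND PROOFS =====

-- the per-value total B computes, as a sum (via PySem.List.foldl_add)
def pvNotes (rec : List (String × List Int)) : List Int := (PySem.Dict.mk rec).getD "notes" []
def pvCnt (s : List (List (String × List Int))) (v : Int) : Int :=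
  (s.map (fun rec => (PySem.List.count (pvNotes rec) v : Int))).sum

-- the one-step dict updates of A's inner loop, on the seeded shape
lemma step1 (a b c d e : Int) :
    (PySem.Dict.mk [(5,a),(4,b),(3,c),(2,d),(1,e)] : PySem.Dict Int Int).insert 1
      ((PySem.Dict.mk [(5,a),(4,b),(3,c),(2,d),(1,e)] : PySem.Dict Int Int).getD 1 0 + 1)
    = PySem.Dict.mk [(5,a),(4,b),(3,c),(2,d),(1,e+1)] := by
  simp [PySem.Dict.insert, PySem.Dict.getD, PySem.Dict.get?, PySem.Dict.contains]

lemma step2 (a b c d e : Int) :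
    (PySem.Dict.mk [(5,a),(4,b),(3,c),(2,d),(1,e)] : PySem.Dict Int Int).insert 2
      ((PySem.Dict.mk [(5,a),(4,b),(3,c),(2,d),(1,e)] : PySem.Dict Int Int).getD 2 0 + 1)
    = PySem.Dict.mk [(5,a),(4,b),(3,c),(2,d+1),(1,e)] := by
  simp [PySem.Dict.insert, PySem.Dict.getD, PySem.Dict.get?, PySem.Dict.contains]

lemma step3 (a b c d e : Int) :
    (PySem.Dict.mk [(5,a),(4,b),(3,c),(2,d),(1,e)] : PySem.Dict Int Int).insert 3
      ((PySem.Dict.mk [(5,a),(4,b),(3,c),(2,d),(1,e)] : PySem.Dict Int Int).getD 3 0 + 1)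
    = PySem.Dict.mk [(5,a),(4,b),(3,c+1),(2,d),(1,e)] := by
  simp [PySem.Dict.insert, PySem.Dict.getD, PySem.Dict.get?, PySem.Dict.contains]

lemma step4 (a b c d e : Int) :
    (PySem.Dict.mk [(5,a),(4,b),(3,c),(2,d),(1,e)] : PySem.Dict Int Int).insert 4
      ((PySem.Dict.mk [(5,a),(4,b),(3,c),(2,d),(1,e)] : PySem.Dict Int Int).getD 4 0 + 1)
    = PySem.Dict.mk [(5,a),(4,b+1),(3,c),(2,d),(1,e)] := by
  simp [PySem.Dict.insert, PySem.Dict.getD, PySem.Dict.get?, PySem.Dict.contains]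

lemma step5 (a b c d e : Int) :
    (PySem.Dict.mk [(5,a),(4,b),(3,c),(2,d),(1,e)] : PySem.Dict Int Int).insert 5
      ((PySem.Dict.mk [(5,a),(4,b),(3,c),(2,d),(1,e)] : PySem.Dict Int Int).getD 5 0 + 1)
    = PySem.Dict.mk [(5,a+1),(4,b),(3,c),(2,d),(1,e)] := by
  simp [PySem.Dict.insert, PySem.Dict.getD, PySem.Dict.get?, PySem.Dict.contains]

-- A's inner loop over one record's notes, on a dict of the seeded shape
lemma inner_fold (notes : List Int) (a b c d e : Int) :
    notes.foldl (fun (n : PySem.Dict Int Int) j =>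
        if j ∈ ([1, 2, 3, 4, 5] : List Int) then n.insert j (n.getD j 0 + 1) else n)
      (PySem.Dict.mk [(5, a), (4, b), (3, c), (2, d), (1, e)]) =
    PySem.Dict.mk [(5, a + PySem.List.count notes 5), (4, b + PySem.List.count notes 4),
      (3, c + PySem.List.count notes 3), (2, d + PySem.List.count notes 2),
      (1, e + PySem.List.count notes 1)] := by
  induction notes generalizing a b c d e with
  | nil => simp [PySem.List.count]
  | cons j t ih =>
    simp only [List.foldl_cons]
    by_cases h1 : j = 1
    · subst h1; rw [if_pos (by decide), step1, ih]
      simp [PySem.List.count]; omega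
    · by_cases h2 : j = 2
      · subst h2; rw [if_pos (by decide), step2, ih]
        simp [PySem.List.count]; omega
      · by_cases h3 : j = 3
        · subst h3; rw [if_pos (by decide), step3, ih]
          simp [PySem.List.count]; omega
        · by_cases h4 : j = 4
          · subst h4; rw [if_pos (by decide), step4, ih]
            simp [PySem.List.count]; omega
          · by_cases h5 : j = 5
            · subst h5; rw [if_pos (by decide), step5, ih]
              simp [PySem.List.count]; omega
            · rw [if_neg (by simp [h1, h2, h3, h4, h5]), ih]
              simp [PySem.List.count, h1, h2, h3, h4, h5]

-- A's accumulation over all records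
lemma acc_fold (s : List (List (String × List Int))) (a b c d e : Int) :
    s.foldl (fun (n : PySem.Dict Int Int) rec =>
        ((PySem.Dict.mk rec).getD "notes" []).foldl (fun (n : PySem.Dict Int Int) j =>
          if j ∈ ([1, 2, 3, 4, 5] : List Int) then n.insert j (n.getD j 0 + 1) else n) n)
      (PySem.Dict.mk [(5, a), (4, b), (3, c), (2, d), (1, e)]) =
    PySem.Dict.mk [(5, a + pvCnt s 5), (4, b + pvCnt s 4), (3, c + pvCnt s 3),
      (2, d + pvCnt s 2), (1, e + pvCnt s 1)] := by
  induction s generalizing a b c d e with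
  | nil => simp [pvCnt]
  | cons rec t ih =>
    simp only [List.foldl_cons]
    rw [inner_fold, ih]
    simp [pvCnt, pvNotes]
    omega

-- the deletion pass on the seeded shape equals B's nonzero-insert loop, for any totals C
lemma del_eq_insert (C : Int → Int) :
    ((([1, 2, 3, 4, 5] : List Int)).foldl
        (fun (n : PySem.Dict Int Int) k => if n.getD k 0 == 0 then n.erase k else n)
        (PySem.Dict.mk [(5, C 5), (4, C 4), (3, C 3), (2, C 2), (1, C 1)])).items =
    ((([5, 4, 3, 2, 1] : List Int)).foldl
        (fun (r : PySem.Dict Int Int) v => if C v ≠ 0 then r.insert v (C v) else r)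
        PySem.Dict.empty).items := by
  by_cases h1 : C 1 = 0 <;> by_cases h2 : C 2 = 0 <;> by_cases h3 : C 3 = 0 <;>
    by_cases h4 : C 4 = 0 <;> by_cases h5 : C 5 = 0 <;>
    simp [List.foldl, PySem.Dict.erase, PySem.Dict.insert, PySem.Dict.getD,
      PySem.Dict.get?, PySem.Dict.contains, PySem.Dict.empty,
      h1, h2, h3, h4, h5]

-- ===== VERDICT (by name: the statement is the Claim_ definition above) =====
theorem get_notes_distribution_spec : Claim_equal_get_notes_distribution := by
  intro s _ _
  show get_notes_distribution s = get_notes_distribution_alt s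
  simp only [get_notes_distribution, get_notes_distribution_alt]
  rw [PySem.List.foldl_pyRange_pyGetD s []
      (fun (n : PySem.Dict Int Int) rec =>
        ((PySem.Dict.mk rec).getD "notes" []).foldl (fun (n : PySem.Dict Int Int) j =>
          if j ∈ ([1, 2, 3, 4, 5] : List Int) then n.insert j (n.getD j 0 + 1) else n) n)
      _ (le_refl 0)]
  simp only [Int.toNat_zero, List.drop_zero]
  rw [acc_fold]
  have hB : ∀ (r : PySem.Dict Int Int),
      (([5, 4, 3, 2, 1] : List Int)).foldl (fun (r : PySem.Dict Int Int) v =>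
        if s.foldl (fun t rec =>
            t + (PySem.List.count ((PySem.Dict.mk rec).getD "notes" []) v : Int)) 0 ≠ 0 then
          r.insert v (s.foldl (fun t rec =>
            t + (PySem.List.count ((PySem.Dict.mk rec).getD "notes" []) v : Int)) 0)
        else r) r =
      (([5, 4, 3, 2, 1] : List Int)).foldl (fun (r : PySem.Dict Int Int) v =>
        if pvCnt s v ≠ 0 then r.insert v (pvCnt s v) else r) r := by
    intro r
    refine PySem.List.foldl_congr_mem _ _ _ _ (fun r v _ => ?_)
    have : s.foldl (fun t rec =>
        t + (PySem.List.count ((PySem.Dict.mk rec).getD "notes" []) v : Int)) 0 = pvCnt s v := by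
      rw [PySem.List.foldl_add]
      simp [pvCnt, pvNotes]
    simp only [this]
  rw [hB]
  have hrange : PySem.List.pyRange 1 6 = ([1, 2, 3, 4, 5] : List Int) := by decide
  rw [hrange]
  simp only [zero_add]
  exact del_eq_insert (pvCnt s)
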